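-- pv_equiv track=rewrite | github.com/david-a-wheeler/secure-dependencies | references/scripts/analysis_shared.py | compute_dep_diff
-- ===== SOURCE A (Python) =====
-- def compute_dep_diff(
--     runtime_dep_lines: list[str],
--     old_dep_lines: list[str],
-- ) -> tuple[list[str], list[str], list[str], list[str]]:
--     """Compute sorted dep lists and added/removed sets from new and old dep lines.
--
--     Returns (dep_lines_new, dep_lines_old, added_deps, removed_deps).
--     All returned lists are sorted. Sanitizes each line with sanitize().
--
--     >>> new, old, added, removed = compute_dep_diff(['b', 'a'], ['a', 'c'])
--     >>> new
--     ['a', 'b']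
--     >>> added
--     ['b']
--     >>> removed
--     ['c']
--     """
--     dep_lines_new = sorted(sanitize(l) for l in runtime_dep_lines)
--     dep_lines_old = sorted(sanitize(l) for l in old_dep_lines)
--     added_deps = sorted(set(dep_lines_new) - set(dep_lines_old))
--     removed_deps = sorted(set(dep_lines_old) - set(dep_lines_new))
--     return dep_lines_new, dep_lines_old, added_deps, removed_deps
--
-- def sanitize(text: str) -> str:
--     """Replace C0/C1 control chars with '?'.
--
--     Strips bidi controls and zero-width chars used for visual spoofing or
--     prompt injection before any text reaches the AI.
--
--     >>> sanitize('hello')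
--     'hello'
--     >>> sanitize('hel\\x01lo')
--     'hel?lo'
--     >>> sanitize('tab\\there')
--     'tab?here'
--     >>> sanitize('del\\x7fchar')
--     'del?char'
--     """
--     result = []
--     for ch in text:
--         cp = ord(ch)
--         if (0x00 <= cp <= 0x1F) or (0x7F <= cp <= 0x9F):
--             result.append('?')
--         else:
--             result.append(ch)
--     return ''.join(result)
-- ===== SOURCE B (Python) =====
-- def _sanitize(text):
--     return ''.join('?' if ord(c) <= 0x1F or 0x7F <= ord(c) <= 0x9F else c for c in text)
--
-- def compute_dep_diff(runtime_dep_lines, old_dep_lines):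
--     dep_lines_new = sorted(_sanitize(l) for l in runtime_dep_lines)
--     dep_lines_old = sorted(_sanitize(l) for l in old_dep_lines)
--     old_set = set(dep_lines_old)
--     new_set = set(dep_lines_new)
--     added_deps = []
--     for x in dep_lines_new:
--         if x not in old_set and (not added_deps or added_deps[-1] != x):
--             added_deps.append(x)
--     removed_deps = []
--     for x in dep_lines_old:
--         if x not in new_set and (not removed_deps or removed_deps[-1] != x):
--             removed_deps.append(x)
--     return dep_lines_new, dep_lines_old, added_deps, removed_deps
-- ===== Notes on version B (the rewrite author's own statement) =====
-- stated objective: alternative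
-- what changed: added/removed are computed by a single dedup-on-the-fly scan over each already-sorted list (membership test against the other set), instead of materialising set differences and sorting them again.
import Mathlib
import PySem

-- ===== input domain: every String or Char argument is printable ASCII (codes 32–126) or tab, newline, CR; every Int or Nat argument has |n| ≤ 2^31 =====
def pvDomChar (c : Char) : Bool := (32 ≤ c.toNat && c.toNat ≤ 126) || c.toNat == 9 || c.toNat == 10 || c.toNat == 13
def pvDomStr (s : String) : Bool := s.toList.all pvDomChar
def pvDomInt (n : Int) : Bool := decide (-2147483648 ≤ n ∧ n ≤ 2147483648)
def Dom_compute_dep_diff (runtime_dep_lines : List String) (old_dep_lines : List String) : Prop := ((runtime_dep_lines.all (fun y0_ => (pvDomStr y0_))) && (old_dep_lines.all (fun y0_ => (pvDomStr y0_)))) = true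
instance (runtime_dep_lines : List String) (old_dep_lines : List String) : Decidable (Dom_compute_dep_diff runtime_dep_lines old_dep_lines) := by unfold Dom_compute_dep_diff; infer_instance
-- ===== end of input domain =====

-- B computes added/removed by a single dedup-on-the-fly scan of each already-sorted list
-- (membership test against the other set) instead of sorting the set differences again.

-- ===== PORT A =====
def sanitize (text : String) : String :=
  String.mk (text.toList.foldl (fun result ch =>
      let cp := ch.toNat
      if (0 ≤ cp ∧ cp ≤ 0x1F) ∨ (0x7F ≤ cp ∧ cp ≤ 0x9F) then result ++ ['?'] else result ++ [ch])
    [])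

def compute_dep_diff (runtime_dep_lines : List String) (old_dep_lines : List String) : List String × List String × List String × List String :=
  let dep_lines_new := PySem.List.sorted (runtime_dep_lines.map sanitize) (fun x => x) false
  let dep_lines_old := PySem.List.sorted (old_dep_lines.map sanitize) (fun x => x) false
  let added_deps := PySem.List.sorted (PySem.Set.diff (PySem.Set.ofList dep_lines_new) (PySem.Set.ofList dep_lines_old)) (fun x => x) false
  let removed_deps := PySem.List.sorted (PySem.Set.diff (PySem.Set.ofList dep_lines_old) (PySem.Set.ofList dep_lines_new)) (fun x => x) false
  (dep_lines_new, dep_lines_old, added_deps, removed_deps)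

-- ===== PORT B =====
def sanitize_alt (text : String) : String :=
  String.mk (text.toList.map (fun c => if c.toNat ≤ 0x1F ∨ (0x7F ≤ c.toNat ∧ c.toNat ≤ 0x9F) then '?' else c))

def compute_dep_diff_alt (runtime_dep_lines : List String) (old_dep_lines : List String) : List String × List String × List String × List String :=
  let dep_lines_new := PySem.List.sorted (runtime_dep_lines.map sanitize_alt) (fun x => x) false
  let dep_lines_old := PySem.List.sorted (old_dep_lines.map sanitize_alt) (fun x => x) false
  let old_set := PySem.Set.ofList dep_lines_old
  let new_set := PySem.Set.ofList dep_lines_new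
  let added_deps := dep_lines_new.foldl
    (fun acc x => if ¬ PySem.Set.contains old_set x ∧ acc.getLast? ≠ some x then acc ++ [x] else acc) []
  let removed_deps := dep_lines_old.foldl
    (fun acc x => if ¬ PySem.Set.contains new_set x ∧ acc.getLast? ≠ some x then acc ++ [x] else acc) []
  (dep_lines_new, dep_lines_old, added_deps, removed_deps)

-- ===== PRECONDITION & SPEC =====
def Spec_compute_dep_diff (runtime_dep_lines : List String) (old_dep_lines : List String) (out : List String × List String × List String × List String) : Prop := out = compute_dep_diff_alt runtime_dep_lines old_dep_lines
instance (runtime_dep_lines : List String) (old_dep_lines : List String) (out : List String × List String × List String × List String) : Decidable (Spec_compute_dep_diff runtime_dep_lines old_dep_lines out) := by unfold Spec_compute_dep_diff; infer_instance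

-- ===== CLAIM (what is proved, stated in full; the proofs are below) =====
def Claim_equal_compute_dep_diff : Prop := ∀ (runtime_dep_lines : List String) (old_dep_lines : List String), Dom_compute_dep_diff runtime_dep_lines old_dep_lines → Spec_compute_dep_diff runtime_dep_lines old_dep_lines (compute_dep_diff runtime_dep_lines old_dep_lines)

-- ===== LEMMAS AND PROOFS =====

theorem sanitize_eq_alt : sanitize = sanitize_alt := by
  funext text
  unfold sanitize sanitize_alt
  congr 1
  have h : ∀ (l : List Char) (acc : List Char),
      l.foldl (fun result ch =>
        let cp := ch.toNat
        if (0 ≤ cp ∧ cp ≤ 0x1F) ∨ (0x7F ≤ cp ∧ cp ≤ 0x9F) then result ++ ['?'] else result ++ [ch]) acc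
      = acc ++ l.map (fun c => if c.toNat ≤ 0x1F ∨ (0x7F ≤ c.toNat ∧ c.toNat ≤ 0x9F) then '?' else c) := by
    intro l
    induction l with
    | nil => intro acc; simp
    | cons c t ih =>
      intro acc
      simp only [List.foldl_cons, List.map_cons, ih]
      by_cases hc : c.toNat ≤ 0x1F ∨ (0x7F ≤ c.toNat ∧ c.toNat ≤ 0x9F)
      · have : (0 ≤ c.toNat ∧ c.toNat ≤ 0x1F) ∨ (0x7F ≤ c.toNat ∧ c.toNat ≤ 0x9F) := by
          rcases hc with h1 | h2
          · exact Or.inl ⟨Nat.zero_le _, h1⟩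
          · exact Or.inr h2
        simp [hc]
      · have : ¬ ((0 ≤ c.toNat ∧ c.toNat ≤ 0x1F) ∨ (0x7F ≤ c.toNat ∧ c.toNat ≤ 0x9F)) := by
          intro h'
          rcases h' with h1 | h2
          · exact hc (Or.inl h1.2)
          · exact hc (Or.inr h2)
        simp [hc]
  exact h text.toList []

-- recursive form of B's dedup-scan loop (prev = last element appended so far)
def scan (t : List String) (prev : Option String) : List String → List String
  | [] => []
  | x :: xs => if ¬ PySem.Set.contains t x ∧ prev ≠ some x then x :: scan t (some x) xs else scan t prev xs

theorem foldl_eq_scan (t : List String) : ∀ (l acc : List String),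
    l.foldl (fun acc x => if ¬ PySem.Set.contains t x ∧ acc.getLast? ≠ some x then acc ++ [x] else acc) acc
      = acc ++ scan t acc.getLast? l := by
  intro l
  induction l with
  | nil => intro acc; simp [scan]
  | cons x xs ih =>
    intro acc
    simp only [List.foldl_cons, scan]
    by_cases hc : ¬ PySem.Set.contains t x = true ∧ acc.getLast? ≠ some x
    · rw [if_pos hc, if_pos hc, ih]
      simp
    · rw [if_neg hc, if_neg hc, ih]

theorem mem_scan (t : List String) : ∀ (X : List String) (prev : Option String),
    X.Pairwise (· ≤ ·) → (∀ p ∈ prev, ∀ y ∈ X, p ≤ y) →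
    ∀ a, a ∈ scan t prev X ↔ a ∈ X ∧ a ∉ t ∧ some a ≠ prev := by
  intro X
  induction X with
  | nil => intro prev _ _ a; simp [scan]
  | cons x xs ih =>
    intro prev hp hinv a
    have hx : ∀ y ∈ xs, x ≤ y := (List.pairwise_cons.mp hp).1
    have hpx : xs.Pairwise (· ≤ ·) := (List.pairwise_cons.mp hp).2
    have hmem : PySem.Set.contains t x = true ↔ x ∈ t := by
      simp [PySem.Set.contains]
    simp only [scan]
    by_cases h1 : PySem.Set.contains t x
    · -- x filtered out: x ∈ t
      have hxt : x ∈ t := hmem.mp h1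
      have : ¬ (¬ PySem.Set.contains t x = true ∧ prev ≠ some x) := fun h => h.1 h1
      rw [if_neg this]
      rw [ih prev hpx (fun p hpp y hy => hinv p hpp y (List.mem_cons_of_mem _ hy))]
      constructor
      · rintro ⟨h2, h3, h4⟩; exact ⟨List.mem_cons_of_mem _ h2, h3, h4⟩
      · rintro ⟨h2, h3, h4⟩
        rcases List.mem_cons.mp h2 with rfl | h2
        · exact absurd hxt h3
        · exact ⟨h2, h3, h4⟩
    · by_cases h2 : prev = some x
      · -- x was the last appended value: skipped
        have : ¬ (¬ PySem.Set.contains t x = true ∧ prev ≠ some x) := fun h => h.2 h2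
        rw [if_neg this]
        rw [ih prev hpx (fun p hpp y hy => hinv p hpp y (List.mem_cons_of_mem _ hy))]
        constructor
        · rintro ⟨h3, h4, h5⟩; exact ⟨List.mem_cons_of_mem _ h3, h4, h5⟩
        · rintro ⟨h3, h4, h5⟩
          rcases List.mem_cons.mp h3 with rfl | h3
          · exact absurd h2.symm h5
          · exact ⟨h3, h4, h5⟩
      · -- x is kept
        have hxt : x ∉ t := fun hmem' => h1 (hmem.mpr hmem')
        rw [if_pos ⟨h1, h2⟩]
        have ihx := ih (some x) hpx (by
          intro p hpp y hy
          simp only [Option.mem_def, Option.some.injEq] at hpp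
          subst hpp; exact hx y hy)
        simp only [List.mem_cons, ihx]
        constructor
        · rintro (rfl | ⟨h3, h4, h5⟩)
          · exact ⟨Or.inl rfl, hxt, fun h => h2 h.symm⟩
          · refine ⟨Or.inr h3, h4, ?_⟩
            intro hpa
            -- prev = some a, invariant gives a ≤ x, but x ≤ a since a ∈ xs → a = x, contradicting h2
            have hle : a ≤ x := hinv a (by simp [← hpa]) x (List.mem_cons_self)
            have hge : x ≤ a := hx a h3
            exact h2 (by rw [← hpa, le_antisymm hle hge])
        · rintro ⟨h3 | h3, h4, h5⟩
          · exact Or.inl h3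
          · by_cases hax : a = x
            · exact Or.inl hax
            · exact Or.inr ⟨h3, h4, by simpa using hax⟩

theorem scan_sorted (t : List String) : ∀ (X : List String) (prev : Option String),
    X.Pairwise (· ≤ ·) → (∀ p ∈ prev, ∀ y ∈ X, p ≤ y) →
    (scan t prev X).Pairwise (· < ·) ∧ (∀ b ∈ scan t prev X, ∀ p ∈ prev, p < b) := by
  intro X
  induction X with
  | nil => intro prev _ _; simp [scan]
  | cons x xs ih =>
    intro prev hp hinv
    have hx : ∀ y ∈ xs, x ≤ y := (List.pairwise_cons.mp hp).1
    have hpxs : xs.Pairwise (· ≤ ·) := (List.pairwise_cons.mp hp).2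
    simp only [scan]
    by_cases hc : ¬ PySem.Set.contains t x = true ∧ prev ≠ some x
    · rw [if_pos hc]
      have ihx := ih (some x) hpxs (by
        intro p hpp y hy
        simp only [Option.mem_def, Option.some.injEq] at hpp
        subst hpp; exact hx y hy)
      have htail : ∀ b ∈ scan t (some x) xs, x < b := by
        intro b hb
        exact ihx.2 b hb x rfl
      constructor
      · exact List.pairwise_cons.mpr ⟨htail, ihx.1⟩
      · intro b hb p hpp
        rcases List.mem_cons.mp hb with rfl | hb
        · -- b = x; p ∈ prev, p ≤ x and p ≠ x
          have hle : p ≤ b := hinv p hpp b (List.mem_cons_self)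
          have hne : p ≠ b := by
            intro h; subst h
            exact hc.2 (by simpa using hpp)
          exact lt_of_le_of_ne hle hne
        · exact lt_trans (by
            have hle : p ≤ x := hinv p hpp x (List.mem_cons_self)
            have hne : p ≠ x := fun h => hc.2 (by subst h; simpa using hpp)
            exact lt_of_le_of_ne hle hne) (htail b hb)
    · rw [if_neg hc]
      exact ih prev hpxs (fun p hpp y hy => hinv p hpp y (List.mem_cons_of_mem _ hy))

-- A's sorted set-difference equals B's dedup-scan on the sorted list
theorem sorted_diff_eq_scan (X Y : List String) (hX : X.Pairwise (· ≤ ·)) :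
    PySem.List.sorted (PySem.Set.diff (PySem.Set.ofList X) (PySem.Set.ofList Y)) (fun x => x) false
      = scan (PySem.Set.ofList Y) none X := by
  apply PySem.List.sorted_eq_of_perm_of_pairwise_lt
  · -- permutation: both Nodup with the same members
    have h1 : (scan (PySem.Set.ofList Y) none X).Nodup := by
      have := (scan_sorted (PySem.Set.ofList Y) X none hX (by simp)).1
      exact this.imp ne_of_lt
    have h2 : (PySem.Set.diff (PySem.Set.ofList X) (PySem.Set.ofList Y)).Nodup :=
      PySem.Set.nodup_diff (PySem.Set.ofList X) (PySem.Set.ofList Y) (PySem.Set.nodup_ofList X)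
    rw [List.perm_ext_iff_of_nodup h1 h2]
    intro a
    rw [mem_scan (PySem.Set.ofList Y) X none hX (by simp) a]
    rw [PySem.Set.mem_diff, PySem.Set.mem_ofList, PySem.Set.mem_ofList]
    simp
  · exact (scan_sorted (PySem.Set.ofList Y) X none hX (by simp)).1

-- ===== VERDICT (by name: the statement is the Claim_ definition above) =====
theorem compute_dep_diff_spec : Claim_equal_compute_dep_diff := by
  intro runtime_dep_lines old_dep_lines _
  unfold Spec_compute_dep_diff compute_dep_diff compute_dep_diff_alt
  rw [sanitize_eq_alt]
  set N := PySem.List.sorted (runtime_dep_lines.map sanitize_alt) (fun x => x) false with hN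
  set O := PySem.List.sorted (old_dep_lines.map sanitize_alt) (fun x => x) false with hO
  have hNs : N.Pairwise (· ≤ ·) := by
    have := PySem.List.sorted_pairwise (xs := runtime_dep_lines.map sanitize_alt) (key := fun x => x)
    simpa [hN] using this
  have hOs : O.Pairwise (· ≤ ·) := by
    have := PySem.List.sorted_pairwise (xs := old_dep_lines.map sanitize_alt) (key := fun x => x)
    simpa [hO] using this
  refine Prod.ext rfl (Prod.ext rfl (Prod.ext ?_ ?_))
  · simp only [foldl_eq_scan, List.getLast?_nil, List.nil_append]
    exact sorted_diff_eq_scan N O hNs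
  · simp only [foldl_eq_scan, List.getLast?_nil, List.nil_append]
    exact sorted_diff_eq_scan O N hOs
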